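-- pv_equiv track=rewrite | github.com/ccxxrr12/WAF_scan-analysis-tool | Part3 deeplearning/模型训练集合（输入数据即可训练）.py | _has_suspicious_headers
-- ===== SOURCE A (Python) =====
-- def _has_suspicious_headers(request):
--     """检查是否有可疑的头部"""
--     suspicious_headers = {
--         "user-agent", "accept", "accept-language", "accept-encoding",
--         "referer", "cookie", "authorization"
--     }
--
--     lines = request.split("\r\n")
--     for line in lines:
--         if ":" in line:
--             header_name = line.split(":", 1)[0].lower()
--             if header_name not in suspicious_headers:
--                 return 1
--     return 0
-- ===== SOURCE B (Python) =====
-- def _has_suspicious_headers(request):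
--     """检查是否有可疑的头部"""
--     allowed = {
--         "user-agent", "accept", "accept-language", "accept-encoding",
--         "referer", "cookie", "authorization"
--     }
--     # single pass over the raw characters: no splitting, no intermediate line list
--     n = len(request)
--     i = 0
--     name = ""        # lowercased chars of the current line before its first ':'
--     seen_colon = False
--     while i < n:
--         c = request[i]
--         if c == "\r" and i + 1 < n and request[i + 1] == "\n":
--             # line break: reset the per-line state
--             i += 2
--             name = ""
--             seen_colon = False
--             continue
--         if not seen_colon:
--             if c == ":":
--                 if name not in allowed:
--                     return 1
--                 seen_colon = True
--             else:
--                 name += c.lower()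
--         i += 1
--     return 0
-- ===== Notes on version B (the rewrite author's own statement) =====
-- stated objective: alternative
-- what changed: Replaces A's split-into-lines-then-scan with a single character-level state machine over the raw request: it tracks the lowercased name of the current line up to its first ':' and resets at each "\r\n", never materialising the line list.
import Mathlib
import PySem

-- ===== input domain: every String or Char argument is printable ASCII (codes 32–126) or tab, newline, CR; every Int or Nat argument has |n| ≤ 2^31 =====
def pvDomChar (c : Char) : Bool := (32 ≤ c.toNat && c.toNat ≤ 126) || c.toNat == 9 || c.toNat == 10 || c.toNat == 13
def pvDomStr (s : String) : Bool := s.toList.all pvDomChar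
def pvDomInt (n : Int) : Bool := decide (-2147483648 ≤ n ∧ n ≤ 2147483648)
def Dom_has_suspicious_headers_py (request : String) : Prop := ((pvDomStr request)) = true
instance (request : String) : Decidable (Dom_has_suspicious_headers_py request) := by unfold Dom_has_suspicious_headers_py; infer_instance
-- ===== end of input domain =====

-- B replaces A's split-into-lines-then-scan with a one-pass character-level state
-- machine over the raw request (objective: alternative; same output everywhere).

-- ===== PORT A =====
-- the set literal `suspicious_headers` of A
def pvSuspiciousA : PySem.Set String :=
  PySem.Set.ofList ["user-agent", "accept", "accept-language", "accept-encoding",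
                    "referer", "cookie", "authorization"]

-- line.split(":", 1)[0].lower() — split(":",1) always returns a non-empty list, so headD "" is exact
def pvHeaderNameA (line : String) : String :=
  PySem.Str.lower ((((PySem.Str.splitMax? line ":" 1).getD []).headD ""))

-- the for-loop with its early `return 1`
def pvLoopA (lines : List String) : Int :=
  match lines with
  | [] => 0
  | line :: rest =>
    if PySem.Str.isIn ":" line then
      if PySem.Set.contains pvSuspiciousA (pvHeaderNameA line) then pvLoopA rest
      else 1
    else pvLoopA rest

def has_suspicious_headers_py (request : String) : Int :=
  pvLoopA ((PySem.Str.split? request "\r\n").getD [])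

-- ===== PORT B =====
def pvAllowedB : PySem.Set String :=
  PySem.Set.ofList ["user-agent", "accept", "accept-language", "accept-encoding",
                    "referer", "cookie", "authorization"]

-- Source B's while-loop: one character at a time with a lookahead for "\r\n";
-- `name` holds the lowercased chars of the current line before its first ':'.
def pvLoopB (cs : List Char) (name : List Char) (seenColon : Bool) : Int :=
  match cs with
  | [] => 0
  | c :: rest =>
    if c = '\r' ∧ rest.head? = some '\n' then
      pvLoopB rest.tail [] false
    else if seenColon then
      pvLoopB rest name seenColon
    else if c = ':' then
      if PySem.Set.contains pvAllowedB (String.ofList name) then pvLoopB rest name true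
      else 1
    else
      pvLoopB rest (name ++ [PySem.Chars.lowerChar c]) seenColon
  termination_by cs.length
  decreasing_by
    · simp only [List.length_cons]
      have := List.length_tail (l := rest)
      omega
    all_goals simp

def has_suspicious_headers_py_alt (request : String) : Int :=
  pvLoopB request.toList [] false

-- ===== PRECONDITION & SPEC =====
def Spec_has_suspicious_headers_py (request : String) (out : Int) : Prop := out = has_suspicious_headers_py_alt request
instance (request : String) (out : Int) : Decidable (Spec_has_suspicious_headers_py request out) := by unfold Spec_has_suspicious_headers_py; infer_instance

-- ===== CLAIM (what is proved, stated in full; the proofs are below) =====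
def Claim_equal_has_suspicious_headers_py : Prop := ∀ (request : String), Dom_has_suspicious_headers_py request → Spec_has_suspicious_headers_py request (has_suspicious_headers_py request)

-- the per-line check both programs perform, parameterised by B's running state
def pvFirstOK (name : List Char) (seen : Bool) (l : List Char) : Bool :=
  seen || !(l.contains ':')
    || PySem.Set.contains pvAllowedB
         (String.ofList (name ++ (l.takeWhile (· ≠ ':')).map PySem.Chars.lowerChar))

-- the line decomposition A's split("\r\n") performs, re-stated structurally
def pvSplit (cs : List Char) : List (List Char) :=
  match cs with
  | [] => [[]]
  | c :: rest =>
    if c = '\r' ∧ rest.head? = some '\n' then [] :: pvSplit rest.tail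
    else (c :: (pvSplit rest).headD []) :: (pvSplit rest).tail
  termination_by cs.length
  decreasing_by
    · simp only [List.length_cons]
      have := List.length_tail (l := rest)
      omega
    all_goals simp

-- ===== LEMMAS AND PROOFS =====

-- unfolding equations for the two structurally recursive helpers
theorem pvSplit_nil : pvSplit ([] : List Char) = [[]] := by rw [pvSplit.eq_def]

theorem pvSplit_cons (c : Char) (rest : List Char) :
    pvSplit (c :: rest)
      = if c = '\r' ∧ rest.head? = some '\n' then [] :: pvSplit rest.tail
        else (c :: (pvSplit rest).headD []) :: (pvSplit rest).tail := by
  rw [pvSplit.eq_def]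

theorem pvLoopB_nil (name : List Char) (seen : Bool) : pvLoopB [] name seen = 0 := by
  rw [pvLoopB.eq_def]

theorem pvLoopB_cons (c : Char) (rest name : List Char) (seen : Bool) :
    pvLoopB (c :: rest) name seen
      = if c = '\r' ∧ rest.head? = some '\n' then
          pvLoopB rest.tail [] false
        else if seen then
          pvLoopB rest name seen
        else if c = ':' then
          if PySem.Set.contains pvAllowedB (String.ofList name) then pvLoopB rest name true
          else 1
        else
          pvLoopB rest (name ++ [PySem.Chars.lowerChar c]) seen := by
  rw [pvLoopB.eq_def]

-- '":" in line' is membership of ':' in the characters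
theorem pvIsIn_colon (l : List Char) : PySem.Chars.isIn [':'] l = l.contains ':' := by
  rcases h : l.contains ':' with _ | _
  · simp only [List.contains_eq_mem, decide_eq_false_iff_not] at h
    rw [PySem.Chars.isIn_eq_false_iff]
    intro hin
    exact h (List.IsInfix.sublist hin |> List.singleton_sublist.mp)
  · simp only [List.contains_eq_mem, decide_eq_true_eq] at h
    rw [PySem.Chars.isIn_iff_infix]
    obtain ⟨s, t, rfl⟩ := List.append_of_mem h
    exact ⟨s, t, by simp⟩

theorem pvSplit_ne_nil (cs : List Char) : pvSplit cs ≠ [] := by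
  match cs with
  | [] => rw [pvSplit_nil]; simp
  | c :: rest => rw [pvSplit_cons]; split_ifs <;> simp

theorem pvSplit_cons_head_tail (cs : List Char) :
    pvSplit cs = (pvSplit cs).headD [] :: (pvSplit cs).tail := by
  rcases h : pvSplit cs with _ | ⟨a, t⟩
  · exact absurd h (pvSplit_ne_nil cs)
  · simp [h]

theorem pvAll_split (cs : List Char) (p : List Char → Bool) :
    (pvSplit cs).all p = (p ((pvSplit cs).headD []) && ((pvSplit cs).tail).all p) := by
  conv_lhs => rw [pvSplit_cons_head_tail cs]
  simp

-- characterisation of PySem's splitOn.go for the separator "\r\n"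
theorem pvGoSplit (fuel : Nat) (l cur : List Char) (acc : List (List Char))
    (h : l.length ≤ fuel) :
    PySem.Chars.splitOn.go ['\r', '\n'] fuel l cur acc
      = acc.reverse ++ (cur.reverse ++ (pvSplit l).headD []) :: (pvSplit l).tail := by
  induction fuel generalizing l cur acc with
  | zero =>
    have : l = [] := List.length_eq_zero_iff.mp (Nat.le_zero.mp h)
    subst this
    rw [PySem.Chars.splitOn.go, pvSplit_nil]
    simp
  | succ fuel ih =>
    match l with
    | [] =>
      rw [PySem.Chars.splitOn.go, pvSplit_nil]
      simp
      omega
    | c :: rest =>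
      by_cases hc : c = '\r' ∧ rest.head? = some '\n'
      · obtain ⟨rfl, hh⟩ := hc
        cases rest with
        | nil => simp at hh
        | cons d rest' =>
          simp only [List.head?_cons, Option.some.injEq] at hh
          subst hh
          have hpre : List.isPrefixOf ['\r', '\n'] ('\r' :: '\n' :: rest') = true := by
            simp [List.isPrefixOf]
          rw [PySem.Chars.splitOn.go]
          simp only [hpre, if_pos]
          have hdrop : List.drop ['\r', '\n'].length ('\r' :: '\n' :: rest') = rest' := rfl
          rw [hdrop]
          rw [ih rest' [] (cur.reverse :: acc) (by simp at h ⊢; omega)]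
          have hps : pvSplit ('\r' :: '\n' :: rest') = [] :: pvSplit rest' := by
            rw [pvSplit_cons, if_pos ⟨rfl, rfl⟩]
            simp [List.tail_cons]
          rw [hps]
          simpa using (pvSplit_cons_head_tail rest').symm
      · have hpre : List.isPrefixOf ['\r', '\n'] (c :: rest) = false := by
          cases rest with
          | nil => simp [List.isPrefixOf]
          | cons d rest' =>
            by_cases hcr : c = '\r'
            · subst hcr
              have hd : ('\n' == d) = false :=
                beq_eq_false_iff_ne.mpr (fun hx => hc ⟨rfl, by simp [← hx]⟩)
              simp [List.isPrefixOf, hd]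
            · have hcr2 : ('\r' == c) = false :=
                beq_eq_false_iff_ne.mpr (fun hx => hcr hx.symm)
              simp [List.isPrefixOf, hcr2]
        rw [PySem.Chars.splitOn.go]
        simp only [hpre, Bool.false_eq_true, if_false]
        rw [ih rest (c :: cur) acc (by simp at h ⊢; omega)]
        have hps : pvSplit (c :: rest)
            = (c :: (pvSplit rest).headD []) :: (pvSplit rest).tail := by
          rw [pvSplit_cons, if_neg hc]
        rw [hps]
        simp

theorem pvSplitOn_eq (cs : List Char) :
    PySem.Chars.splitOn cs ['\r', '\n'] = pvSplit cs := by
  unfold PySem.Chars.splitOn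
  rw [pvGoSplit (cs.length + 1) cs [] [] (by omega)]
  simpa using (pvSplit_cons_head_tail cs).symm

-- splitOnMax.go with maxsplit exhausted returns the remainder as one piece
theorem pvGoMax0 (fuel : Nat) (l : List Char) (acc : List (List Char)) :
    PySem.Chars.splitOnMax.go [':'] fuel 0 l [] acc = acc.reverse ++ [l] := by
  match fuel, l with
  | 0, l => rw [PySem.Chars.splitOnMax.go]; simp
  | fuel + 1, [] => rw [PySem.Chars.splitOnMax.go]; simp; omega
  | fuel + 1, c :: rest => rw [PySem.Chars.splitOnMax.go]; simp

-- splitOnMax.go with maxsplit 1: the first piece is everything before the first ':'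
theorem pvGoMax1 (fuel : Nat) (l cur : List Char) (acc : List (List Char))
    (h : l.length ≤ fuel) :
    ∃ t, PySem.Chars.splitOnMax.go [':'] fuel 1 l cur acc
      = acc.reverse ++ (cur.reverse ++ l.takeWhile (· ≠ ':')) :: t := by
  induction fuel generalizing l cur acc with
  | zero =>
    have : l = [] := List.length_eq_zero_iff.mp (Nat.le_zero.mp h)
    subst this
    refine ⟨[], ?_⟩
    rw [PySem.Chars.splitOnMax.go]
    simp
  | succ fuel ih =>
    match l with
    | [] =>
      refine ⟨[], ?_⟩
      rw [PySem.Chars.splitOnMax.go]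
      simp
      omega
    | c :: rest =>
      by_cases hc : c = ':'
      · subst hc
        have hpre : List.isPrefixOf [':'] (':' :: rest) = true := by simp [List.isPrefixOf]
        refine ⟨[rest], ?_⟩
        rw [PySem.Chars.splitOnMax.go]
        simp only [hpre, if_pos]
        have h10 : (1 : Nat) - 1 = 0 := rfl
        simp only [Nat.add_one_ne_zero, if_false, h10]
        rw [pvGoMax0]
        simp [List.takeWhile_cons]
      · have hb : ((':' : Char) == c) = false :=
          beq_eq_false_iff_ne.mpr (fun hx => hc hx.symm)
        have hpre : List.isPrefixOf [':'] (c :: rest) = false := by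
          simp [List.isPrefixOf, hb]
        obtain ⟨t, ht⟩ := ih rest (c :: cur) acc (by simp at h ⊢; omega)
        refine ⟨t, ?_⟩
        rw [PySem.Chars.splitOnMax.go]
        simp only [Nat.add_one_ne_zero, if_false, hpre, Bool.false_eq_true]
        rw [ht]
        simp [List.takeWhile_cons, hc, List.append_assoc]

-- A's header-name expression, computed on the character list
theorem pvHeaderNameA_eq (line : String) :
    pvHeaderNameA line
      = String.ofList ((line.toList.takeWhile (· ≠ ':')).map PySem.Chars.lowerChar) := by
  unfold pvHeaderNameA
  obtain ⟨t, ht⟩ := pvGoMax1 (line.toList.length + 1) line.toList [] [] (by omega)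
  rw [PySem.Str.splitMax?]
  have hsm : PySem.Chars.splitMax? line.toList [':'] 1
      = some ((line.toList.takeWhile (· ≠ ':')) :: t) := by
    rw [PySem.Chars.splitMax?]
    simp only [List.isEmpty_cons, Bool.false_eq_true, if_false]
    rw [PySem.Chars.splitOnMax]
    rw [if_neg (by omega)]
    simpa using ht
  have hcolon : (":" : String).toList = [':'] := rfl
  rw [hcolon, hsm]
  simp [PySem.Str.lower, PySem.Chars.lower]

-- A's early-return loop is the conjunction of the per-line checks
theorem pvLoopA_eq (lines : List String) :
    pvLoopA lines = if lines.all (fun line => pvFirstOK [] false line.toList) then 0 else 1 := by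
  induction lines with
  | nil => simp [pvLoopA]
  | cons line rest ih =>
    rw [pvLoopA]
    have hIn : PySem.Str.isIn ":" line = line.toList.contains ':' := by
      rw [PySem.Str.isIn]
      have hcolon : (":" : String).toList = [':'] := rfl
      rw [hcolon, pvIsIn_colon]
    have hSet : pvSuspiciousA = pvAllowedB := rfl
    by_cases hc : line.toList.contains ':' = true
    · rw [if_pos (by rw [hIn]; exact hc)]
      by_cases hm : PySem.Set.contains pvSuspiciousA (pvHeaderNameA line) = true
      · rw [if_pos hm, ih]
        have hok : pvFirstOK [] false line.toList = true := by
          unfold pvFirstOK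
          simp only [List.nil_append]
          rw [← hSet, ← pvHeaderNameA_eq, hm]
          simp
        simp [hok]
      · rw [if_neg hm]
        have hok : pvFirstOK [] false line.toList = false := by
          have hm' : PySem.Set.contains pvSuspiciousA (pvHeaderNameA line) = false := by
            revert hm; cases pvSuspiciousA.contains (pvHeaderNameA line) <;> simp
          unfold pvFirstOK
          simp only [List.nil_append]
          rw [← hSet, ← pvHeaderNameA_eq, hm', hc]
          simp
        simp [hok]
    · rw [if_neg (by rw [hIn]; exact hc), ih]
      have hok : pvFirstOK [] false line.toList = true := by
        unfold pvFirstOK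
        simp at hc
        simp [hc]
      simp [hok]

-- B's state machine computes the same conjunction, split at the current line
theorem pvLoopB_eq (cs name : List Char) (seen : Bool) :
    pvLoopB cs name seen =
      if pvFirstOK name seen ((pvSplit cs).headD [])
          && ((pvSplit cs).tail).all (pvFirstOK [] false) then 0 else 1 := by
  induction cs, name, seen using pvLoopB.induct with
  | case1 name seen =>
    rw [pvLoopB_nil, pvSplit_nil]
    simp [pvFirstOK]
  | case2 name seen c rest hc ih =>
    have hps : pvSplit (c :: rest) = [] :: pvSplit rest.tail := by
      rw [pvSplit_cons, if_pos hc]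
    rw [pvLoopB_cons, if_pos hc, ih, hps]
    simp only [List.headD_cons, List.tail_cons]
    have h1 : pvFirstOK name seen [] = true := by simp [pvFirstOK]
    simp only [h1, Bool.true_and, pvAll_split]
  | case3 name c rest hc ih =>
    have hps : pvSplit (c :: rest)
        = (c :: (pvSplit rest).headD []) :: (pvSplit rest).tail := by
      rw [pvSplit_cons, if_neg hc]
    rw [pvLoopB_cons, if_neg hc, if_pos rfl, ih, hps]
    simp only [List.headD_cons, List.tail_cons]
    have h1 : pvFirstOK name true (c :: (pvSplit rest).headD []) = true := by
      simp [pvFirstOK]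
    have h2 : pvFirstOK name true ((pvSplit rest).headD []) = true := by
      simp [pvFirstOK]
    simp only [h1, h2]
  | case4 name seen rest hseen hmem hc ih =>
    have hps : pvSplit (':' :: rest)
        = (':' :: (pvSplit rest).headD []) :: (pvSplit rest).tail := by
      rw [pvSplit_cons, if_neg hc]
    rw [pvLoopB_cons, if_neg hc, if_neg hseen, if_pos rfl, if_pos hmem, ih, hps]
    simp only [List.headD_cons, List.tail_cons]
    have h1 : pvFirstOK name seen (':' :: (pvSplit rest).headD []) = true := by
      unfold pvFirstOK
      simp [List.takeWhile_cons]
      exact Or.inr ((PySem.Set.contains_iff _ _).1 hmem)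
    have h2 : pvFirstOK name true ((pvSplit rest).headD []) = true := by
      simp [pvFirstOK]
    simp only [h1, h2]
  | case5 name seen rest hseen hmem hc =>
    have hps : pvSplit (':' :: rest)
        = (':' :: (pvSplit rest).headD []) :: (pvSplit rest).tail := by
      rw [pvSplit_cons, if_neg hc]
    rw [pvLoopB_cons, if_neg hc, if_neg hseen, if_pos rfl, if_neg hmem, hps]
    simp only [List.headD_cons, List.tail_cons]
    have hs : seen = false := by revert hseen; cases seen <;> simp
    have h1 : pvFirstOK name seen (':' :: (pvSplit rest).headD []) = false := by
      unfold pvFirstOK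
      simp [hs, List.takeWhile_cons]
      simpa using hmem
    simp only [h1, Bool.false_and, Bool.false_eq_true, if_false]
  | case6 name seen c rest hc hseen hcolon ih =>
    have hps : pvSplit (c :: rest)
        = (c :: (pvSplit rest).headD []) :: (pvSplit rest).tail := by
      rw [pvSplit_cons, if_neg hc]
    rw [pvLoopB_cons, if_neg hc, if_neg hseen, if_neg hcolon, ih, hps]
    simp only [List.headD_cons, List.tail_cons]
    have hcolon' : (':' = c) → False := fun hx => hcolon hx.symm
    have h1 : pvFirstOK name seen (c :: (pvSplit rest).headD [])
        = pvFirstOK (name ++ [PySem.Chars.lowerChar c]) seen ((pvSplit rest).headD []) := by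
      have hb : (decide (':' = c)) = false := decide_eq_false hcolon'
      unfold pvFirstOK
      simp [List.takeWhile_cons, hcolon, hb, List.append_assoc]
    simp only [h1]

-- ===== VERDICT =====
theorem has_suspicious_headers_py_spec : Claim_equal_has_suspicious_headers_py := by
  intro request _
  unfold Spec_has_suspicious_headers_py has_suspicious_headers_py has_suspicious_headers_py_alt
  have hsplit : (PySem.Str.split? request "\r\n").getD []
      = (pvSplit request.toList).map String.ofList := by
    rw [PySem.Str.split?]
    have hsep : ("\r\n" : String).toList = ['\r', '\n'] := rfl
    rw [hsep, PySem.Chars.split?]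
    simp only [List.isEmpty_cons, Bool.false_eq_true, if_false]
    rw [pvSplitOn_eq]
    rfl
  rw [hsplit, pvLoopA_eq, pvLoopB_eq]
  have hall : ((pvSplit request.toList).map String.ofList).all
        (fun line => pvFirstOK [] false line.toList)
      = (pvSplit request.toList).all (pvFirstOK [] false) := by
    rw [List.all_map]
    congr 1
    funext l
    simp [Function.comp_def, String.toList_ofList]
  simp only [hall, pvAll_split]
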